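-- pv_equiv track=rewrite | github.com/Vardandatasciences/RISKAVAIRE_TPRM | grc_backend/grc/routes/uploadNist/policy_extractor_enhanced.py | categorize_policy_comprehensive
-- ===== SOURCE A (Python) =====
-- from typing import List, Dict, Any, Optional, Tuple
--
-- def categorize_policy_comprehensive(policy_title: str, policy_description: str, section_title: str = "") -> Tuple[str, str, str]:
--     """Comprehensive policy categorization with detailed subcategories."""
--     title_lower = policy_title.lower()
--     desc_lower = policy_description.lower()
--     section_lower = section_title.lower()
--
--     combined_text = f"{title_lower} {desc_lower} {section_lower}"
--
--     # Security policies with detailed subcategories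
--     if any(keyword in combined_text for keyword in ['security', 'access', 'authentication', 'authorization', 'encryption', 'firewall', 'vulnerability', 'threat', 'malware', 'antivirus']):
--         if any(keyword in combined_text for keyword in ['access', 'authentication', 'authorization', 'identity', 'user', 'login', 'password']):
--             return "Security", "Access Control and Identity Management", "Identity and Authentication"
--         elif any(keyword in combined_text for keyword in ['network', 'firewall', 'intrusion', 'perimeter', 'segmentation']):
--             return "Security", "Network Security", "Perimeter Protection and Monitoring"
--         elif any(keyword in combined_text for keyword in ['data', 'encryption', 'cryptography', 'key management', 'classification']):
--             return "Security", "Data Protection", "Information Security and Encryption"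
--         elif any(keyword in combined_text for keyword in ['vulnerability', 'patch', 'scanning', 'assessment']):
--             return "Security", "Vulnerability Management", "Security Assessment and Remediation"
--         elif any(keyword in combined_text for keyword in ['incident', 'response', 'forensics', 'breach']):
--             return "Security", "Incident Response", "Security Incident Management"
--         else:
--             return "Security", "General Security Controls", "Security Governance"
--
--     # Compliance policies with regulatory focus
--     elif any(keyword in combined_text for keyword in ['compliance', 'regulatory', 'audit', 'standard', 'requirement', 'certification']):
--         if any(keyword in combined_text for keyword in ['pci', 'payment', 'card', 'financial']):
--             return "Compliance", "Financial Regulations", "Payment Card Industry Standards"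
--         elif any(keyword in combined_text for keyword in ['privacy', 'gdpr', 'hipaa', 'personal data']):
--             return "Compliance", "Privacy Regulations", "Data Protection Laws"
--         elif any(keyword in combined_text for keyword in ['sox', 'sarbanes', 'financial reporting']):
--             return "Compliance", "Financial Reporting", "Corporate Governance"
--         else:
--             return "Compliance", "Regulatory Compliance", "Standards Adherence"
--
--     # Risk Management policies
--     elif any(keyword in combined_text for keyword in ['risk', 'threat', 'assessment', 'mitigation', 'management']):
--         if any(keyword in combined_text for keyword in ['business continuity', 'disaster recovery', 'continuity']):
--             return "Risk Management", "Business Continuity", "Disaster Recovery Planning"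
--         elif any(keyword in combined_text for keyword in ['vendor', 'supplier', 'third party', 'outsourcing']):
--             return "Risk Management", "Third-Party Risk", "Vendor Risk Management"
--         else:
--             return "Risk Management", "Enterprise Risk Management", "Risk Assessment and Mitigation"
--
--     # Privacy policies
--     elif any(keyword in combined_text for keyword in ['privacy', 'personal', 'pii', 'phi', 'cardholder', 'patient', 'customer data']):
--         if any(keyword in combined_text for keyword in ['health', 'medical', 'patient', 'phi']):
--             return "Privacy", "Healthcare Privacy", "Protected Health Information"
--         elif any(keyword in combined_text for keyword in ['payment', 'card', 'financial', 'cardholder']):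
--             return "Privacy", "Financial Privacy", "Payment Card Data Protection"
--         else:
--             return "Privacy", "Data Privacy", "Personal Information Protection"
--
--     # Operational policies
--     elif any(keyword in combined_text for keyword in ['operational', 'procedure', 'process', 'workflow', 'management', 'administration']):
--         if any(keyword in combined_text for keyword in ['change', 'configuration', 'deployment']):
--             return "Operations", "Change Management", "Configuration and Deployment"
--         elif any(keyword in combined_text for keyword in ['monitoring', 'logging', 'audit trail']):
--             return "Operations", "Monitoring and Logging", "System Monitoring"
--         else:
--             return "Operations", "Operational Procedures", "Process Management"
--
--     # Governance policies
--     elif any(keyword in combined_text for keyword in ['governance', 'oversight', 'management', 'leadership', 'board']):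
--         return "Governance", "Corporate Governance", "Executive Oversight"
--
--     # Training and awareness
--     elif any(keyword in combined_text for keyword in ['training', 'awareness', 'education', 'competency']):
--         return "Human Resources", "Training and Awareness", "Security Education"
--
--     # Physical security
--     elif any(keyword in combined_text for keyword in ['physical', 'facility', 'premises', 'building', 'access control']):
--         return "Security", "Physical Security", "Facility Access Control"
--
--     # Default categorization
--     else:
--         return "General", "Policy Management", "General Requirements"
-- ===== SOURCE B (Python) =====
-- from typing import Tuple
--
-- # B: instead of lazily running substring searches branch by branch (as A does),
-- # scan the combined text ONCE, collecting into a set every keyword of the whole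
-- # vocabulary that occurs in it; the decision logic then only does set-membership
-- # queries against that precomputed hit set, driven by an ordered rule table.
--
-- _RULES = [
--     (['security', 'access', 'authentication', 'authorization', 'encryption', 'firewall', 'vulnerability', 'threat', 'malware', 'antivirus'],
--      [(['access', 'authentication', 'authorization', 'identity', 'user', 'login', 'password'],
--        ("Security", "Access Control and Identity Management", "Identity and Authentication")),
--       (['network', 'firewall', 'intrusion', 'perimeter', 'segmentation'],
--        ("Security", "Network Security", "Perimeter Protection and Monitoring")),
--       (['data', 'encryption', 'cryptography', 'key management', 'classification'],
--        ("Security", "Data Protection", "Information Security and Encryption")),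
--       (['vulnerability', 'patch', 'scanning', 'assessment'],
--        ("Security", "Vulnerability Management", "Security Assessment and Remediation")),
--       (['incident', 'response', 'forensics', 'breach'],
--        ("Security", "Incident Response", "Security Incident Management"))],
--      ("Security", "General Security Controls", "Security Governance")),
--     (['compliance', 'regulatory', 'audit', 'standard', 'requirement', 'certification'],
--      [(['pci', 'payment', 'card', 'financial'],
--        ("Compliance", "Financial Regulations", "Payment Card Industry Standards")),
--       (['privacy', 'gdpr', 'hipaa', 'personal data'],
--        ("Compliance", "Privacy Regulations", "Data Protection Laws")),
--       (['sox', 'sarbanes', 'financial reporting'],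
--        ("Compliance", "Financial Reporting", "Corporate Governance"))],
--      ("Compliance", "Regulatory Compliance", "Standards Adherence")),
--     (['risk', 'threat', 'assessment', 'mitigation', 'management'],
--      [(['business continuity', 'disaster recovery', 'continuity'],
--        ("Risk Management", "Business Continuity", "Disaster Recovery Planning")),
--       (['vendor', 'supplier', 'third party', 'outsourcing'],
--        ("Risk Management", "Third-Party Risk", "Vendor Risk Management"))],
--      ("Risk Management", "Enterprise Risk Management", "Risk Assessment and Mitigation")),
--     (['privacy', 'personal', 'pii', 'phi', 'cardholder', 'patient', 'customer data'],
--      [(['health', 'medical', 'patient', 'phi'],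
--        ("Privacy", "Healthcare Privacy", "Protected Health Information")),
--       (['payment', 'card', 'financial', 'cardholder'],
--        ("Privacy", "Financial Privacy", "Payment Card Data Protection"))],
--      ("Privacy", "Data Privacy", "Personal Information Protection")),
--     (['operational', 'procedure', 'process', 'workflow', 'management', 'administration'],
--      [(['change', 'configuration', 'deployment'],
--        ("Operations", "Change Management", "Configuration and Deployment")),
--       (['monitoring', 'logging', 'audit trail'],
--        ("Operations", "Monitoring and Logging", "System Monitoring"))],
--      ("Operations", "Operational Procedures", "Process Management")),
--     (['governance', 'oversight', 'management', 'leadership', 'board'],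
--      [], ("Governance", "Corporate Governance", "Executive Oversight")),
--     (['training', 'awareness', 'education', 'competency'],
--      [], ("Human Resources", "Training and Awareness", "Security Education")),
--     (['physical', 'facility', 'premises', 'building', 'access control'],
--      [], ("Security", "Physical Security", "Facility Access Control")),
-- ]
--
-- # the whole keyword vocabulary, in rule order
-- _KEYWORDS = [k for triggers, subs, _ in _RULES
--              for group in [triggers] + [ks for ks, _ in subs]
--              for k in group]
--
--
-- def _matched_keywords(text):
--     """One pass over the text: the set of vocabulary keywords occurring in it."""
--     found = set()
--     for i in range(len(text)):
--         for k in _KEYWORDS: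
--             if text.startswith(k, i):
--                 found.add(k)
--     return found
--
--
-- def categorize_policy_comprehensive(policy_title: str, policy_description: str, section_title: str = "") -> Tuple[str, str, str]:
--     text = f"{policy_title.lower()} {policy_description.lower()} {section_title.lower()}"
--     hits = _matched_keywords(text)
--     for triggers, subrules, default in _RULES:
--         if any(k in hits for k in triggers):
--             for keywords, triple in subrules:
--                 if any(k in hits for k in keywords):
--                     return triple
--             return default
--     return ("General", "Policy Management", "General Requirements")
-- ===== Notes on version B (the rewrite author's own statement) =====
-- stated objective: alternative
-- what changed: Instead of A's lazy branch-by-branch substring searches, B makes one pass over the combined text collecting the set of all vocabulary keywords that occur in it, and the rule dispatch then only performs set-membership queries against that precomputed hit set.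
import Mathlib
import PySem

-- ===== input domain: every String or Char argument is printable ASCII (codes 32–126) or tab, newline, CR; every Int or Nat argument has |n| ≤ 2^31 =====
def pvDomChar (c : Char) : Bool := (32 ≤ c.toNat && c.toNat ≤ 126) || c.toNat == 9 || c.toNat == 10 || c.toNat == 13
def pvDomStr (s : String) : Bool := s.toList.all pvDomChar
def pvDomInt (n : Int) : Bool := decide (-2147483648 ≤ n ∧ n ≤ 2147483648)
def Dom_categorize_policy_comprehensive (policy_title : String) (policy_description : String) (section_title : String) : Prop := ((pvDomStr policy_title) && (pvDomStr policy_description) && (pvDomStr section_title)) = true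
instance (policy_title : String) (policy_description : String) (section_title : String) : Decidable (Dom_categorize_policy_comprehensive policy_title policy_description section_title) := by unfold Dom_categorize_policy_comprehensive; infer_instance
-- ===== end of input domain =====

-- B replaces A's lazy branch-by-branch substring searches by ONE scan of the text that collects the
-- set of all occurring vocabulary keywords, after which the rule dispatch only does set lookups
-- (objective: alternative; same precedence, same results).

-- ===== PORT A =====
-- any(keyword in combined_text for keyword in ks)
def pvAnyKwA (t : List Char) (ks : List String) : Bool :=
  ks.any (fun k => PySem.Chars.isIn k.toList t)

def categorize_policy_comprehensive (policy_title : String) (policy_description : String) (section_title : String) : String × String × String :=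
  let title_lower := PySem.Chars.lower policy_title.toList
  let desc_lower := PySem.Chars.lower policy_description.toList
  let section_lower := PySem.Chars.lower section_title.toList
  let combined_text := title_lower ++ [' '] ++ desc_lower ++ [' '] ++ section_lower
  if pvAnyKwA combined_text ["security", "access", "authentication", "authorization", "encryption", "firewall", "vulnerability", "threat", "malware", "antivirus"] then
    if pvAnyKwA combined_text ["access", "authentication", "authorization", "identity", "user", "login", "password"] then
      ("Security", "Access Control and Identity Management", "Identity and Authentication")
    else if pvAnyKwA combined_text ["network", "firewall", "intrusion", "perimeter", "segmentation"] then
      ("Security", "Network Security", "Perimeter Protection and Monitoring")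
    else if pvAnyKwA combined_text ["data", "encryption", "cryptography", "key management", "classification"] then
      ("Security", "Data Protection", "Information Security and Encryption")
    else if pvAnyKwA combined_text ["vulnerability", "patch", "scanning", "assessment"] then
      ("Security", "Vulnerability Management", "Security Assessment and Remediation")
    else if pvAnyKwA combined_text ["incident", "response", "forensics", "breach"] then
      ("Security", "Incident Response", "Security Incident Management")
    else
      ("Security", "General Security Controls", "Security Governance")
  else if pvAnyKwA combined_text ["compliance", "regulatory", "audit", "standard", "requirement", "certification"] then
    if pvAnyKwA combined_text ["pci", "payment", "card", "financial"] then
      ("Compliance", "Financial Regulations", "Payment Card Industry Standards")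
    else if pvAnyKwA combined_text ["privacy", "gdpr", "hipaa", "personal data"] then
      ("Compliance", "Privacy Regulations", "Data Protection Laws")
    else if pvAnyKwA combined_text ["sox", "sarbanes", "financial reporting"] then
      ("Compliance", "Financial Reporting", "Corporate Governance")
    else
      ("Compliance", "Regulatory Compliance", "Standards Adherence")
  else if pvAnyKwA combined_text ["risk", "threat", "assessment", "mitigation", "management"] then
    if pvAnyKwA combined_text ["business continuity", "disaster recovery", "continuity"] then
      ("Risk Management", "Business Continuity", "Disaster Recovery Planning")
    else if pvAnyKwA combined_text ["vendor", "supplier", "third party", "outsourcing"] then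
      ("Risk Management", "Third-Party Risk", "Vendor Risk Management")
    else
      ("Risk Management", "Enterprise Risk Management", "Risk Assessment and Mitigation")
  else if pvAnyKwA combined_text ["privacy", "personal", "pii", "phi", "cardholder", "patient", "customer data"] then
    if pvAnyKwA combined_text ["health", "medical", "patient", "phi"] then
      ("Privacy", "Healthcare Privacy", "Protected Health Information")
    else if pvAnyKwA combined_text ["payment", "card", "financial", "cardholder"] then
      ("Privacy", "Financial Privacy", "Payment Card Data Protection")
    else
      ("Privacy", "Data Privacy", "Personal Information Protection")
  else if pvAnyKwA combined_text ["operational", "procedure", "process", "workflow", "management", "administration"] then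
    if pvAnyKwA combined_text ["change", "configuration", "deployment"] then
      ("Operations", "Change Management", "Configuration and Deployment")
    else if pvAnyKwA combined_text ["monitoring", "logging", "audit trail"] then
      ("Operations", "Monitoring and Logging", "System Monitoring")
    else
      ("Operations", "Operational Procedures", "Process Management")
  else if pvAnyKwA combined_text ["governance", "oversight", "management", "leadership", "board"] then
    ("Governance", "Corporate Governance", "Executive Oversight")
  else if pvAnyKwA combined_text ["training", "awareness", "education", "competency"] then
    ("Human Resources", "Training and Awareness", "Security Education")
  else if pvAnyKwA combined_text ["physical", "facility", "premises", "building", "access control"] then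
    ("Security", "Physical Security", "Facility Access Control")
  else
    ("General", "Policy Management", "General Requirements")

-- ===== PORT B =====
-- _KEYWORDS of Source B: the whole vocabulary, flattened in rule order (duplicates kept, as in Source B)
def pvKeywords : List String :=
  ["security", "access", "authentication", "authorization", "encryption", "firewall", "vulnerability",
   "threat", "malware", "antivirus", "access", "authentication", "authorization", "identity", "user",
   "login", "password", "network", "firewall", "intrusion", "perimeter", "segmentation", "data",
   "encryption", "cryptography", "key management", "classification", "vulnerability", "patch",
   "scanning", "assessment", "incident", "response", "forensics", "breach", "compliance", "regulatory",
   "audit", "standard", "requirement", "certification", "pci", "payment", "card", "financial",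
   "privacy", "gdpr", "hipaa", "personal data", "sox", "sarbanes", "financial reporting", "risk",
   "threat", "assessment", "mitigation", "management", "business continuity", "disaster recovery",
   "continuity", "vendor", "supplier", "third party", "outsourcing", "privacy", "personal", "pii",
   "phi", "cardholder", "patient", "customer data", "health", "medical", "patient", "phi", "payment",
   "card", "financial", "cardholder", "operational", "procedure", "process", "workflow", "management",
   "administration", "change", "configuration", "deployment", "monitoring", "logging", "audit trail",
   "governance", "oversight", "management", "leadership", "board", "training", "awareness",
   "education", "competency", "physical", "facility", "premises", "building", "access control"]

-- inner loop of _matched_keywords at one position i: text.startswith(k, i) = k prefix of the suffix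
def pvScanHere (suffix : List Char) (found : PySem.Set String) : PySem.Set String :=
  pvKeywords.foldl (fun f k => if k.toList.isPrefixOf suffix then PySem.Set.add f k else f) found

-- _matched_keywords: for i in range(len(text)) — one step per suffix position
def pvScan : List Char → PySem.Set String → PySem.Set String
  | [], found => found
  | c :: rest, found => pvScan rest (pvScanHere (c :: rest) found)

-- any(k in hits for k in ks)
def pvAnyHit (hits : PySem.Set String) (ks : List String) : Bool :=
  ks.any (fun k => PySem.Set.contains hits k)

-- the ordered rule table _RULES of Source B
def pvRules : List (List String × List (List String × (String × String × String)) × (String × String × String)) :=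
  [ (["security", "access", "authentication", "authorization", "encryption", "firewall", "vulnerability", "threat", "malware", "antivirus"],
     [ (["access", "authentication", "authorization", "identity", "user", "login", "password"],
        ("Security", "Access Control and Identity Management", "Identity and Authentication")),
       (["network", "firewall", "intrusion", "perimeter", "segmentation"],
        ("Security", "Network Security", "Perimeter Protection and Monitoring")),
       (["data", "encryption", "cryptography", "key management", "classification"],
        ("Security", "Data Protection", "Information Security and Encryption")),
       (["vulnerability", "patch", "scanning", "assessment"],
        ("Security", "Vulnerability Management", "Security Assessment and Remediation")),
       (["incident", "response", "forensics", "breach"],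
        ("Security", "Incident Response", "Security Incident Management")) ],
     ("Security", "General Security Controls", "Security Governance")),
    (["compliance", "regulatory", "audit", "standard", "requirement", "certification"],
     [ (["pci", "payment", "card", "financial"],
        ("Compliance", "Financial Regulations", "Payment Card Industry Standards")),
       (["privacy", "gdpr", "hipaa", "personal data"],
        ("Compliance", "Privacy Regulations", "Data Protection Laws")),
       (["sox", "sarbanes", "financial reporting"],
        ("Compliance", "Financial Reporting", "Corporate Governance")) ],
     ("Compliance", "Regulatory Compliance", "Standards Adherence")),
    (["risk", "threat", "assessment", "mitigation", "management"],
     [ (["business continuity", "disaster recovery", "continuity"],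
        ("Risk Management", "Business Continuity", "Disaster Recovery Planning")),
       (["vendor", "supplier", "third party", "outsourcing"],
        ("Risk Management", "Third-Party Risk", "Vendor Risk Management")) ],
     ("Risk Management", "Enterprise Risk Management", "Risk Assessment and Mitigation")),
    (["privacy", "personal", "pii", "phi", "cardholder", "patient", "customer data"],
     [ (["health", "medical", "patient", "phi"],
        ("Privacy", "Healthcare Privacy", "Protected Health Information")),
       (["payment", "card", "financial", "cardholder"],
        ("Privacy", "Financial Privacy", "Payment Card Data Protection")) ],
     ("Privacy", "Data Privacy", "Personal Information Protection")),
    (["operational", "procedure", "process", "workflow", "management", "administration"],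
     [ (["change", "configuration", "deployment"],
        ("Operations", "Change Management", "Configuration and Deployment")),
       (["monitoring", "logging", "audit trail"],
        ("Operations", "Monitoring and Logging", "System Monitoring")) ],
     ("Operations", "Operational Procedures", "Process Management")),
    (["governance", "oversight", "management", "leadership", "board"],
     [], ("Governance", "Corporate Governance", "Executive Oversight")),
    (["training", "awareness", "education", "competency"],
     [], ("Human Resources", "Training and Awareness", "Security Education")),
    (["physical", "facility", "premises", "building", "access control"],
     [], ("Security", "Physical Security", "Facility Access Control")) ]

-- inner loop of Source B's dispatch: first matching subrule, else the rule's default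
def pvFirstMatch (hits : PySem.Set String) : List (List String × (String × String × String)) → (String × String × String) → (String × String × String)
  | [], dflt => dflt
  | (ks, triple) :: rest, dflt =>
      if pvAnyHit hits ks then triple else pvFirstMatch hits rest dflt

-- outer loop of Source B's dispatch: first rule whose triggers hit
def pvDispatch (hits : PySem.Set String) : List (List String × List (List String × (String × String × String)) × (String × String × String)) → (String × String × String)
  | [] => ("General", "Policy Management", "General Requirements")
  | (triggers, subrules, dflt) :: rest =>
      if pvAnyHit hits triggers then pvFirstMatch hits subrules dflt else pvDispatch hits rest

def categorize_policy_comprehensive_alt (policy_title : String) (policy_description : String) (section_title : String) : String × String × String :=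
  let text := PySem.Chars.lower policy_title.toList ++ [' '] ++ PySem.Chars.lower policy_description.toList ++ [' '] ++ PySem.Chars.lower section_title.toList
  let hits := pvScan text PySem.Set.empty
  pvDispatch hits pvRules

-- ===== PRECONDITION & SPEC =====
def Spec_categorize_policy_comprehensive (policy_title : String) (policy_description : String) (section_title : String) (out : String × String × String) : Prop := out = categorize_policy_comprehensive_alt policy_title policy_description section_title
instance (policy_title : String) (policy_description : String) (section_title : String) (out : String × String × String) : Decidable (Spec_categorize_policy_comprehensive policy_title policy_description section_title out) := by unfold Spec_categorize_policy_comprehensive; infer_instance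

-- ===== CLAIM =====
def Claim_equal_categorize_policy_comprehensive : Prop := ∀ (policy_title : String) (policy_description : String) (section_title : String), Dom_categorize_policy_comprehensive policy_title policy_description section_title → Spec_categorize_policy_comprehensive policy_title policy_description section_title (categorize_policy_comprehensive policy_title policy_description section_title)

-- ===== LEMMAS AND PROOFS =====
-- membership after scanning one position
theorem pv_mem_foldl (ks : List String) (s : List Char) (found : PySem.Set String) (x : String) :
    x ∈ ks.foldl (fun f k => if k.toList.isPrefixOf s then PySem.Set.add f k else f) found ↔
      x ∈ found ∨ (x ∈ ks ∧ x.toList.isPrefixOf s = true) := by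
  induction ks generalizing found with
  | nil => simp
  | cons k rest ih =>
    simp only [List.foldl_cons, List.mem_cons, ih]
    have hx : x = k → (x.toList.isPrefixOf s) = (k.toList.isPrefixOf s) := by
      intro e; rw [e]
    by_cases hp : k.toList.isPrefixOf s = true
    · rw [if_pos hp, PySem.Set.mem_add]
      constructor
      · rintro ((h | h) | ⟨h1, h2⟩)
        · exact Or.inl h
        · exact Or.inr ⟨Or.inl h, by rw [hx h]; exact hp⟩
        · exact Or.inr ⟨Or.inr h1, h2⟩
      · rintro (h | ⟨h | h, h2⟩)
        · exact Or.inl (Or.inl h)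
        · exact Or.inl (Or.inr h)
        · exact Or.inr ⟨h, h2⟩
    · rw [if_neg hp]
      constructor
      · rintro (h | ⟨h1, h2⟩)
        · exact Or.inl h
        · exact Or.inr ⟨Or.inr h1, h2⟩
      · rintro (h | ⟨h | h, h2⟩)
        · exact Or.inl h
        · exact absurd (by rw [← hx h]; exact h2) hp
        · exact Or.inr ⟨h, h2⟩

-- membership in the full scan: x was found iff it is a vocabulary word prefix of some suffix
theorem pv_mem_scan (t : List Char) (found : PySem.Set String) (x : String) :
    x ∈ pvScan t found ↔
      x ∈ found ∨ (x ∈ pvKeywords ∧ ∃ j, j < t.length ∧ x.toList.isPrefixOf (t.drop j) = true) := by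
  induction t generalizing found with
  | nil => simp [pvScan]
  | cons c rest ih =>
    rw [pvScan, ih, pvScanHere, pv_mem_foldl]
    constructor
    · rintro ((h | ⟨hk, hp⟩) | ⟨hk, j, hj, hp⟩)
      · exact Or.inl h
      · exact Or.inr ⟨hk, 0, by simp, by simpa using hp⟩
      · exact Or.inr ⟨hk, j + 1, by simpa using hj, by simpa using hp⟩
    · rintro (h | ⟨hk, j, hj, hp⟩)
      · exact Or.inl (Or.inl h)
      · cases j with
        | zero => exact Or.inl (Or.inr ⟨hk, by simpa using hp⟩)
        | succ j => exact Or.inr ⟨hk, j, by simp only [List.length_cons] at hj; omega, by simpa using hp⟩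

-- a set query against the scanned hits equals A's substring test, for vocabulary keywords
theorem pv_hit_eq (t : List Char) (ks : List String)
    (h : ∀ k ∈ ks, k ∈ pvKeywords ∧ k.toList ≠ []) :
    pvAnyHit (pvScan t PySem.Set.empty) ks = pvAnyKwA t ks := by
  rw [Bool.eq_iff_iff]
  simp only [pvAnyHit, pvAnyKwA, List.any_eq_true]
  constructor
  · rintro ⟨k, hk, hc⟩
    refine ⟨k, hk, ?_⟩
    rw [PySem.Set.contains_iff, pv_mem_scan] at hc
    rcases hc with h0 | ⟨_, j, _, hp⟩
    · simp [PySem.Set.empty] at h0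
    · rw [← PySem.Chars.exists_prefix_drop_iff_isIn]
      exact ⟨j, List.isPrefixOf_iff_prefix.mp hp⟩
  · rintro ⟨k, hk, hin⟩
    refine ⟨k, hk, ?_⟩
    rw [PySem.Set.contains_iff, pv_mem_scan]
    rw [← PySem.Chars.exists_prefix_drop_iff_isIn] at hin
    obtain ⟨j, hp⟩ := hin
    refine Or.inr ⟨(h k hk).1, j, ?_, List.isPrefixOf_iff_prefix.mpr hp⟩
    by_contra hj
    have : t.drop j = [] := List.drop_eq_nil_of_le (by omega)
    rw [this] at hp
    exact (h k hk).2 (List.prefix_nil.mp hp)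

theorem pv_core_eq (policy_title policy_description section_title : String) :
    categorize_policy_comprehensive policy_title policy_description section_title
      = categorize_policy_comprehensive_alt policy_title policy_description section_title := by
  unfold categorize_policy_comprehensive categorize_policy_comprehensive_alt
  simp only [pvRules, pvDispatch, pvFirstMatch]
  rw [pv_hit_eq _ _ (by decide), pv_hit_eq _ _ (by decide), pv_hit_eq _ _ (by decide),
      pv_hit_eq _ _ (by decide), pv_hit_eq _ _ (by decide), pv_hit_eq _ _ (by decide),
      pv_hit_eq _ _ (by decide), pv_hit_eq _ _ (by decide), pv_hit_eq _ _ (by decide),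
      pv_hit_eq _ _ (by decide), pv_hit_eq _ _ (by decide), pv_hit_eq _ _ (by decide),
      pv_hit_eq _ _ (by decide), pv_hit_eq _ _ (by decide), pv_hit_eq _ _ (by decide),
      pv_hit_eq _ _ (by decide), pv_hit_eq _ _ (by decide), pv_hit_eq _ _ (by decide),
      pv_hit_eq _ _ (by decide), pv_hit_eq _ _ (by decide), pv_hit_eq _ _ (by decide),
      pv_hit_eq _ _ (by decide)]

-- ===== VERDICT =====
theorem categorize_policy_comprehensive_spec : Claim_equal_categorize_policy_comprehensive := by
  intro pt pd st _
  unfold Spec_categorize_policy_comprehensive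
  exact pv_core_eq pt pd st
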